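-- pv_equiv track=rewrite | github.com/Amateraisu/Data-stuctures-and-algo | PrefixSum/K Prefix.py | solve
-- ===== SOURCE A (Python) =====
-- def solve(nums, k):
--     # basically find the largest prefix that does not exceed k
--     current = 0
--     res = -1
--     for i in range(len(nums)):
--         current += nums[i]
--         if current <= k:
--             res = i
--
--     return res
-- ===== SOURCE B (Python) =====
-- def solve(nums, k):
--     # build the table of prefix sums, then search backward for the first
--     # (i.e. largest) index whose prefix sum is <= k
--     prefixes = []
--     total = 0
--     for x in nums:
--         total += x
--         prefixes.append(total)
--     for i in range(len(prefixes) - 1, -1, -1):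
--         if prefixes[i] <= k:
--             return i
--     return -1
-- ===== Notes on version B (the rewrite author's own statement) =====
-- stated objective: alternative
-- what changed: A keeps a running sum and overwrites the answer on every qualifying index in one forward pass; B first materialises the full prefix-sum table and then scans indices backward, returning at the first (largest) index whose prefix sum is <= k.
import Mathlib
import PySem

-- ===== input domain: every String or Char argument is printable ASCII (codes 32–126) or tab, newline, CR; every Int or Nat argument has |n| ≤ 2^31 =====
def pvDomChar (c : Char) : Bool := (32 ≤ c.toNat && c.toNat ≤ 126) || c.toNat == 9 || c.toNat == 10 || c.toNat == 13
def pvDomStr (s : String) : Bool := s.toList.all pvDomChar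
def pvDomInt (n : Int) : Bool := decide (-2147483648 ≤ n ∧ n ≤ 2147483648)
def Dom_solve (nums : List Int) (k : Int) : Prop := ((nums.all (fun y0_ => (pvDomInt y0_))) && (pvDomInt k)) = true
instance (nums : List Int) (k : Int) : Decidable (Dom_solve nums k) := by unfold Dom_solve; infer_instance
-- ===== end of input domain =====

-- B replaces A's single forward running-sum pass with a prefix-sum table plus a
-- backward early-return search for the largest qualifying index (alternative, same cost).


-- ===== PORT A =====
-- for i in range(len(nums)): current += nums[i]; if current <= k: res = i
def solve (nums : List Int) (k : Int) : Int :=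
  ((PySem.List.pyRange 0 (nums.length : Int) 1).foldl
    (fun (st : Int × Int) i =>
      let current := st.1 + PySem.List.pyGetD nums i 0
      (current, if current ≤ k then i else st.2))
    (0, -1)).2

-- ===== PORT B =====
-- prefixes.append(total) loop
def pvAccum (nums : List Int) : List Int :=
  (nums.foldl (fun (st : List Int × Int) x =>
    let t := st.2 + x
    (st.1 ++ [t], t)) ([], 0)).1

-- for i in range(len(prefixes)-1, -1, -1): if prefixes[i] <= k: return i
def pvSearch (prefixes : List Int) (k : Int) : List Int → Int
  | [] => -1
  | i :: rest => if PySem.List.pyGetD prefixes i 0 ≤ k then i else pvSearch prefixes k rest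

def solve_alt (nums : List Int) (k : Int) : Int :=
  let prefixes := pvAccum nums
  pvSearch prefixes k (PySem.List.pyRange ((prefixes.length : Int) - 1) (-1) (-1))

-- ===== PRECONDITION & SPEC =====
def Spec_solve (nums : List Int) (k : Int) (out : Int) : Prop := out = solve_alt nums k
instance (nums : List Int) (k : Int) (out : Int) : Decidable (Spec_solve nums k out) := by unfold Spec_solve; infer_instance

-- ===== CLAIM (what is proved, stated in full; the proofs are below) =====
def Claim_equal_solve : Prop := ∀ (nums : List Int) (k : Int), Dom_solve nums k → Spec_solve nums k (solve nums k)

-- ===== LEMMAS AND PROOFS =====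

-- structural description of the prefix-sum list starting from running total t
def pvScan (t : Int) : List Int → List Int
  | [] => []
  | x :: xs => (t + x) :: pvScan (t + x) xs

theorem pvScan_foldl (xs : List Int) : ∀ (acc : List Int) (t : Int),
    xs.foldl (fun (st : List Int × Int) x => (st.1 ++ [st.2 + x], st.2 + x)) (acc, t)
      = (acc ++ pvScan t xs, t + xs.sum) := by
  induction xs with
  | nil => intro acc t; simp [pvScan]
  | cons x xs ih =>
      intro acc t
      simp only [List.foldl_cons, ih, pvScan, List.sum_cons]
      rw [Prod.mk.injEq]
      exact ⟨by simp, by ring⟩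

theorem pvAccum_eq_scan (xs : List Int) : pvAccum xs = pvScan 0 xs := by
  simpa using congrArg Prod.fst (pvScan_foldl xs [] 0)

theorem pvScan_length (xs : List Int) : ∀ t, (pvScan t xs).length = xs.length := by
  induction xs with
  | nil => intro t; simp [pvScan]
  | cons x xs ih => intro t; simp [pvScan, ih]

theorem pvScan_append (xs : List Int) (x : Int) : ∀ t,
    pvScan t (xs ++ [x]) = pvScan t xs ++ [t + xs.sum + x] := by
  induction xs with
  | nil => intro t; simp [pvScan]
  | cons y ys ih =>
      intro t
      simp only [List.cons_append, pvScan, ih, List.sum_cons]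
      have h : t + y + ys.sum + x = t + (y + ys.sum) + x := by ring
      rw [h]

theorem pvSearch_append (P : List Int) (s k : Int) :
    ∀ r : List Int, (∀ i ∈ r, 0 ≤ i ∧ i < (P.length : Int)) →
      pvSearch (P ++ [s]) k r = pvSearch P k r := by
  intro r
  induction r with
  | nil => intro _; rfl
  | cons i rest ih =>
      intro h
      have hi := h i (by simp)
      have hg : PySem.List.pyGetD (P ++ [s]) i 0 = PySem.List.pyGetD P i 0 := by
        rw [PySem.List.pyGetD_eq_getElem _ _ hi.1 (by simp; omega),
            PySem.List.pyGetD_eq_getElem _ _ hi.1 (by simpa using hi.2)]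
        rw [List.getElem_append_left]
      simp only [pvSearch, hg]
      rw [ih (fun j hj => h j (by simp [hj]))]

theorem main_eq (k : Int) (xs : List Int) :
    ((PySem.List.pyRange 0 (xs.length : Int) 1).foldl
      (fun (st : Int × Int) i =>
        (st.1 + PySem.List.pyGetD xs i 0,
         if st.1 + PySem.List.pyGetD xs i 0 ≤ k then i else st.2))
      (0, -1)) = (xs.sum, solve_alt xs k) := by
  induction xs using List.reverseRecOn with
  | nil =>
      simp [solve_alt, pvAccum, pvSearch, PySem.List.pyRange_one_eq_nil,
        PySem.List.pyRange_neg_one_eq_nil]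
  | append_singleton xs x ih =>
      have hn : ((xs ++ [x]).length : Int) = (xs.length : Int) + 1 := by simp
      rw [hn, PySem.List.pyRange_one_succ_right (by positivity), List.foldl_append]
      have hcongr :
          (PySem.List.pyRange 0 (xs.length : Int) 1).foldl
            (fun (st : Int × Int) i =>
              (st.1 + PySem.List.pyGetD (xs ++ [x]) i 0,
               if st.1 + PySem.List.pyGetD (xs ++ [x]) i 0 ≤ k then i else st.2)) (0, -1)
          = (PySem.List.pyRange 0 (xs.length : Int) 1).foldl
            (fun (st : Int × Int) i =>
              (st.1 + PySem.List.pyGetD xs i 0,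
               if st.1 + PySem.List.pyGetD xs i 0 ≤ k then i else st.2)) (0, -1) := by
        apply PySem.List.foldl_congr_mem
        intro st i hi
        have hmem := (PySem.List.mem_pyRange_one).1 hi
        have hg : PySem.List.pyGetD (xs ++ [x]) i 0 = PySem.List.pyGetD xs i 0 := by
          rw [PySem.List.pyGetD_eq_getElem _ _ hmem.1 (by simp; omega),
              PySem.List.pyGetD_eq_getElem _ _ hmem.1 (by exact_mod_cast hmem.2)]
          rw [List.getElem_append_left]
        rw [hg]
      rw [hcongr, ih]
      have hlast : PySem.List.pyGetD (xs ++ [x]) (xs.length : Int) 0 = x := by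
        rw [PySem.List.pyGetD_eq_getElem _ _ (by positivity) (by simp)]
        simp
      -- unfold the RHS: solve_alt on xs ++ [x]
      have hP : pvAccum (xs ++ [x]) = pvScan 0 xs ++ [xs.sum + x] := by
        rw [pvAccum_eq_scan, pvScan_append]; simp
      have hlen : ((pvAccum (xs ++ [x])).length : Int) - 1 = (xs.length : Int) := by
        rw [hP]; simp [pvScan_length]
      have hrange : PySem.List.pyRange ((xs.length : Int)) (-1) (-1)
          = (xs.length : Int) :: PySem.List.pyRange ((xs.length : Int) - 1) (-1) (-1) :=
        PySem.List.pyRange_neg_one_cons (by omega)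
      have hgetP : PySem.List.pyGetD (pvScan 0 xs ++ [xs.sum + x]) (xs.length : Int) 0
          = xs.sum + x := by
        rw [PySem.List.pyGetD_eq_getElem _ _ (by positivity) (by simp [pvScan_length])]
        have : (xs.length : Int).toNat = (pvScan 0 xs).length := by simp [pvScan_length]
        simp [this]
      have htail : pvSearch (pvScan 0 xs ++ [xs.sum + x]) k
            (PySem.List.pyRange ((xs.length : Int) - 1) (-1) (-1))
          = pvSearch (pvScan 0 xs) k
            (PySem.List.pyRange ((xs.length : Int) - 1) (-1) (-1)) := by
        apply pvSearch_append
        intro i hi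
        have := (PySem.List.mem_pyRange_neg_one).1 hi
        constructor
        · omega
        · rw [pvScan_length]; omega
      have hBalt : solve_alt (xs ++ [x]) k
          = if xs.sum + x ≤ k then (xs.length : Int) else solve_alt xs k := by
        show pvSearch (pvAccum (xs ++ [x])) k
          (PySem.List.pyRange ((pvAccum (xs ++ [x])).length - 1 : Int) (-1) (-1)) = _
        rw [hlen, hP, hrange]
        simp only [pvSearch, hgetP]
        split_ifs with h
        · rfl
        · rw [htail]
          show _ = pvSearch (pvAccum xs) k
            (PySem.List.pyRange ((pvAccum xs).length - 1 : Int) (-1) (-1))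
          rw [pvAccum_eq_scan, pvScan_length]
      simp only [List.foldl_cons, List.foldl_nil, hlast, hBalt]
      rw [Prod.mk.injEq]
      exact ⟨by simp, rfl⟩

-- ===== VERDICT (by name: the statement is the Claim_ definition above) =====
theorem solve_spec : Claim_equal_solve := by
  intro nums k _
  show solve nums k = solve_alt nums k
  unfold solve
  rw [main_eq k nums]
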